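-- pv_equiv track=rewrite | github.com/peppermint100/algorithm | programmers/lvl1/이상한_문자_만들기.py | solution
-- ===== SOURCE A (Python) =====
-- def solution(s):
--     answer = ''
--
--     t_list = s.split(" ")
--
--     for i in range(len(t_list)):
--         c = t_list[i]
--         nw = ""
--         for j in range(len(c)):
--             if j%2==0:
--                 nw+=c[j].upper()
--             else:
--                 nw+=c[j].lower()
--         t_list[i] = nw
--
--     return " ".join(t_list)
-- ===== SOURCE B (Python) =====
-- def solution(s):
--     out = []
--     pos = 0
--     for ch in s:
--         if ch == ' ':
--             out.append(' ')
--             pos = 0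
--         else:
--             out.append(ch.upper() if pos % 2 == 0 else ch.lower())
--             pos += 1
--     return ''.join(out)
-- ===== Notes on version B (the rewrite author's own statement) =====
-- stated objective: simpler
-- what changed: B replaces split(' ')/per-word index loops/join with a single left-to-right pass over s that keeps an in-word position counter reset on each space.
import Mathlib
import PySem

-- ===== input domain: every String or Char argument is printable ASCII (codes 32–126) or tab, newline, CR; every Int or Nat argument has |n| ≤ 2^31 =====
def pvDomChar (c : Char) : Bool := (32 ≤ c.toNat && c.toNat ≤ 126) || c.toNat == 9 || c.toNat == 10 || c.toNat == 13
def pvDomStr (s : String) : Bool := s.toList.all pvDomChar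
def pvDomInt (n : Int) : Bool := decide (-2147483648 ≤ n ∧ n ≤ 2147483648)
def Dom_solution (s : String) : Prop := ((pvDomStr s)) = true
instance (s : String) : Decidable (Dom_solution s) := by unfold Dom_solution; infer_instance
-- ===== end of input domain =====

-- B is a simpler single pass with a position counter reset on ' ' instead of split/per-word loops/join; same O(n) cost.

-- ===== PORT A =====
-- s.split(" ") → Chars.splitOn on [' ']; the i-loop rewrites each element in place from itself only,
-- i.e. it maps the inner j-loop over the list; c[j].upper()/.lower() on a 1-char string → upperChar/lowerChar (exact on ASCII).
def solution (s : String) : String :=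
  let t_list := PySem.Chars.splitOn s.toList [' ']
  let t_list := t_list.map (fun c =>
    (PySem.List.pyRange 0 c.length 1).foldl (fun nw j =>
      nw ++ [if j % 2 == 0 then PySem.Chars.upperChar (PySem.List.pyGetD c j ' ')
             else PySem.Chars.lowerChar (PySem.List.pyGetD c j ' ')]) [])
  String.ofList (PySem.Chars.join [' '] t_list)

-- ===== PORT B =====
-- loop body of B: st = (out, pos); ch.upper()/.lower() on one char → upperChar/lowerChar (exact on ASCII)
def stepB (st : List Char × Nat) (ch : Char) : List Char × Nat :=
  if ch == ' ' then (st.1 ++ [' '], 0)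
  else (st.1 ++ [if st.2 % 2 == 0 then PySem.Chars.upperChar ch else PySem.Chars.lowerChar ch],
        st.2 + 1)

def solution_alt (s : String) : String :=
  let st := s.toList.foldl stepB ([], 0)
  String.ofList st.1

-- ===== PRECONDITION & SPEC =====
def Spec_solution (s : String) (out : String) : Prop := out = solution_alt s
instance (s : String) (out : String) : Decidable (Spec_solution s out) := by unfold Spec_solution; infer_instance

-- ===== CLAIM (what is proved, stated in full; the proofs are below) =====
def Claim_equal_solution : Prop := ∀ (s : String), Dom_solution s → Spec_solution s (solution s)

-- ===== LEMMAS AND PROOFS =====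

-- one word processed from in-word position p (no reset)
def wstr (p : Nat) : List Char → List Char
  | [] => []
  | c :: cs => (if p % 2 == 0 then PySem.Chars.upperChar c else PySem.Chars.lowerChar c) :: wstr (p + 1) cs

-- B's output from in-word position p (resets on ' ')
def bstr (p : Nat) : List Char → List Char
  | [] => []
  | c :: cs => if c = ' ' then ' ' :: bstr 0 cs
               else (if p % 2 == 0 then PySem.Chars.upperChar c else PySem.Chars.lowerChar c) :: bstr (p + 1) cs

-- split on ' ' with the current (reversed) word as accumulator, as splitOn.go keeps it
def sp (cur : List Char) : List Char → List (List Char)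
  | [] => [cur.reverse]
  | c :: cs => if c = ' ' then cur.reverse :: sp [] cs else sp (c :: cur) cs

theorem sp_ne_nil (cur l : List Char) : sp cur l ≠ [] := by
  induction l generalizing cur with
  | nil => simp [sp]
  | cons c cs ih => by_cases h : c = ' ' <;> simp [sp, h, ih]

theorem splitOn_go_eq (fuel : Nat) (l cur : List Char) (acc : List (List Char))
    (h : l.length < fuel) :
    PySem.Chars.splitOn.go [' '] fuel l cur acc = acc.reverse ++ sp cur l := by
  induction fuel generalizing l cur acc with
  | zero => omega
  | succ n ih =>
    cases l with
    | nil => simp [PySem.Chars.splitOn.go, sp]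
    | cons c rest =>
      by_cases hc : c = ' '
      · subst hc
        simp only [PySem.Chars.splitOn.go, List.isPrefixOf, BEq.rfl, Bool.true_and,
          if_true, List.length_cons, List.length_nil, List.drop_succ_cons, List.drop_zero]
        rw [ih rest [] (cur.reverse :: acc) (by simpa using Nat.lt_of_succ_lt_succ h)]
        simp [sp]
      · have hb : ([' '].isPrefixOf (c :: rest)) = false := by
          simp [List.isPrefixOf]; exact fun hh => hc (by simpa using hh.symm)
        simp only [PySem.Chars.splitOn.go, hb]
        rw [ih rest (c :: cur) acc (by simpa using Nat.lt_of_succ_lt_succ h)]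
        simp [sp, hc]

theorem splitOn_eq_sp (l : List Char) : PySem.Chars.splitOn l [' '] = sp [] l := by
  have := splitOn_go_eq (l.length + 1) l [] [] (by omega)
  simpa [PySem.Chars.splitOn] using this

-- A's inner index loop equals wstr
def fA (p : Nat) (cs : List Char) (k : Nat) : Char :=
  if (p + k) % 2 == 0 then PySem.Chars.upperChar (cs.getD k ' ')
  else PySem.Chars.lowerChar (cs.getD k ' ')

theorem fA_succ (p : Nat) (c : Char) (cs : List Char) (k : Nat) :
    fA p (c :: cs) (k + 1) = fA (p + 1) cs k := by
  have h2 : p + (k + 1) = (p + 1) + k := by omega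
  simp [fA, h2, List.getD]

theorem range_map_eq_wstr (cs : List Char) (p : Nat) :
    (List.range cs.length).map (fA p cs) = wstr p cs := by
  induction cs generalizing p with
  | nil => simp [wstr]
  | cons c cs ih =>
    rw [List.length_cons, List.range_succ_eq_map, List.map_cons, List.map_map]
    have hc : (fA p (c :: cs)) ∘ Nat.succ = fA (p + 1) cs := funext fun k => fA_succ p c cs k
    rw [hc, ih, wstr]
    simp [fA, List.getD]

theorem inner_eq_wstr (cs : List Char) :
    (PySem.List.pyRange 0 cs.length 1).foldl (fun nw j =>
      nw ++ [if j % 2 == 0 then PySem.Chars.upperChar (PySem.List.pyGetD cs j ' ')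
             else PySem.Chars.lowerChar (PySem.List.pyGetD cs j ' ')]) [] = wstr 0 cs := by
  rw [PySem.List.pyRange_one, List.foldl_map, PySem.List.foldl_append_singleton_eq_map]
  rw [← range_map_eq_wstr cs 0]
  simp only [Int.sub_zero, Int.toNat_natCast, List.nil_append]
  apply List.map_congr_left
  intro k _
  have hz : ((0 : Int) + (k : Int)) = (k : Int) := by omega
  rw [hz]
  have hcast : (((k : Int)) % 2 == 0) = ((0 + k : Nat) % 2 == 0) := by
    cases hb : ((0 + k : Nat) % 2 == 0) <;>
      simp only [beq_iff_eq, beq_eq_false_iff_ne, ne_eq] at hb ⊢ <;> omega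
  rw [hcast, PySem.List.pyGetD_natCast]
  rfl

-- B's fold equals bstr
theorem foldB_eq_bstr (l acc : List Char) (p : Nat) :
    (l.foldl stepB (acc, p)).1 = acc ++ bstr p l := by
  induction l generalizing acc p with
  | nil => simp [bstr]
  | cons c cs ih =>
    by_cases h : c = ' '
    · subst h; simp [stepB, bstr, ih]
    · simp [List.foldl_cons, stepB, h, bstr, ih]

theorem wstr_append (p : Nat) (xs : List Char) (c : Char) :
    wstr p (xs ++ [c]) = wstr p xs ++ [if (p + xs.length) % 2 == 0 then PySem.Chars.upperChar c
                                       else PySem.Chars.lowerChar c] := by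
  induction xs generalizing p with
  | nil => simp [wstr]
  | cons x xs ih => simp [wstr, ih, Nat.add_assoc, Nat.add_comm 1 xs.length]

theorem join_cons₂ (a b : List Char) (t : List (List Char)) :
    PySem.Chars.join [' '] (a :: b :: t) = a ++ ' ' :: PySem.Chars.join [' '] (b :: t) := by
  simp [PySem.Chars.join, List.intercalate]

theorem main_lemma (l cur : List Char) :
    wstr 0 cur.reverse ++ bstr cur.length l
      = PySem.Chars.join [' '] ((sp cur l).map (wstr 0)) := by
  induction l generalizing cur with
  | nil => simp [sp, bstr, PySem.Chars.join, List.intercalate]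
  | cons c cs ih =>
    by_cases h : c = ' '
    · subst h
      have h0 := ih []
      simp only [sp, if_true, List.map_cons]
      obtain ⟨x, t, hx⟩ : ∃ x t, (sp ([] : List Char) cs).map (wstr 0) = x :: t := by
        cases hs : (sp ([] : List Char) cs).map (wstr 0) with
        | nil => exact absurd (by simpa using hs) (by simp [sp_ne_nil])
        | cons x t => exact ⟨x, t, rfl⟩
      rw [hx, join_cons₂]
      simp only [bstr, if_true]
      rw [← hx, ← h0]
      simp [wstr]
    · have h2 := ih (c :: cur)
      simp only [List.reverse_cons] at h2
      rw [wstr_append, List.length_reverse] at h2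
      simp only [sp, bstr]
      rw [if_neg h, if_neg h, ← h2, List.length_cons]
      simp

-- ===== VERDICT (by name: the statement is the Claim_ definition above) =====
theorem solution_spec : Claim_equal_solution := by
  intro s _
  show solution s = solution_alt s
  unfold solution solution_alt
  simp only [splitOn_eq_sp]
  rw [foldB_eq_bstr s.toList [] 0]
  have := main_lemma s.toList []
  simp only [List.reverse_nil, wstr, List.nil_append, List.length_nil] at this
  rw [this]
  congr 2
  apply List.map_congr_left
  intro c _
  exact inner_eq_wstr c
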